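-- pv_equiv track=rewrite | github.com/shonihei/road-to-mastery | algorithms/string-algorithms/hackerrank-problems/palindrome_index.py | palindrome_index_2
-- ===== SOURCE A (Python) =====
-- def is_pal(s):
--     i = 0
--     j = len(s) - 1
--     for n in range(len(s) // 2):
--         if s[i] != s[j]:
--             return False
--         i += 1
--         j -= 1
--     return True
--
-- def palindrome_index_2(s):
--     if is_pal(s):
--         return -1
--     l = []
--     for i in range(len(s)):
--         l.append(s[:i]+s[i+1:])
--     for i, s in enumerate(l):
--         if is_pal(s):
--             return i
--     return -1
-- ===== SOURCE B (Python) =====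
-- def palindrome_index_2(s):
--     i, j = 0, len(s) - 1
--     while i < j and s[i] == s[j]:
--         i += 1
--         j -= 1
--     if i >= j:
--         return -1
--     sub = s[i+1:j+1]
--     if sub == sub[::-1]:
--         k = i
--         while k > 0 and s[k-1] == s[i]:
--             k -= 1
--         return k
--     sub = s[i:j]
--     if sub == sub[::-1]:
--         return j
--     return -1
-- ===== Notes on version B (the rewrite author's own statement) =====
-- stated objective: faster
-- what changed: A checks every one of the n one-character deletions (each built by slicing and palindrome-checked), O(n^2); B finds the first mismatching pair with two pointers, palindrome-tests only the two candidate windows (drop-left / drop-right), and walks the constant run leftwards to return the same first index, O(n).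
import Mathlib
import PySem

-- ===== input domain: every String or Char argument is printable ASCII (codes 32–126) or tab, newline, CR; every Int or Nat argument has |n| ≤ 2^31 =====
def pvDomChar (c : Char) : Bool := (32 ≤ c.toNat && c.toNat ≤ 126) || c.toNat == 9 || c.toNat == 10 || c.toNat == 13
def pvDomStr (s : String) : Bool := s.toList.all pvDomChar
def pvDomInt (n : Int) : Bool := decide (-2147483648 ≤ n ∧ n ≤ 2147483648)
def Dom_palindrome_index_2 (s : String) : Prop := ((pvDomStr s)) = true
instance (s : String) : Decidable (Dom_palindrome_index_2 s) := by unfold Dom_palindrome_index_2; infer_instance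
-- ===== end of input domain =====

-- B replaces A's scan over all n one-character deletions (each checked separately) by the
-- two-pointer method: find the first mismatching pair, test deleting its left or right end
-- only, walking a constant run leftwards so B returns the same FIRST index A returns.

-- ===== PORT A =====
-- is_pal: half-length loop comparing s[i] with s[j]; on reachable calls both indices are
-- in range, so porting s[i] != s[j] through pyGet? (Option equality) is exact.
def is_pal_go (s : List Char) (i j : Int) : Nat → Bool
  | 0 => true
  | n + 1 =>
    if PySem.List.pyGet? s i ≠ PySem.List.pyGet? s j then false
    else is_pal_go s (i + 1) (j - 1) n

def is_pal (s : List Char) : Bool :=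
  is_pal_go s 0 ((s.length : Int) - 1) (s.length / 2)

-- 'for i, s in enumerate(l): if is_pal(s): return i' / 'return -1'
def find_pal_go : List (Int × List Char) → Int
  | [] => -1
  | (i, t) :: rest => if is_pal t then i else find_pal_go rest

def palindrome_index_2 (s : String) : Int :=
  let sl := s.toList
  if is_pal sl then -1
  else
    -- l = [s[:i] + s[i+1:] for i in range(len(s))] built by append, as in A
    let l := (PySem.List.pyRange 0 (sl.length : Int) 1).foldl
      (fun acc i =>
        acc ++ [PySem.List.slice sl (some 0) (some i) ++ PySem.List.slice sl (some (i + 1)) none]) []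
    find_pal_go (PySem.List.enumerate l 0)

-- ===== PORT B =====
-- while i < j and s[i] == s[j]: i += 1; j -= 1   (indices in range whenever accessed)
def alt_scan (s : List Char) (i j : Int) : Int × Int :=
  if h : i < j ∧ PySem.List.pyGet? s i = PySem.List.pyGet? s j then
    alt_scan s (i + 1) (j - 1)
  else (i, j)
termination_by (j - i).toNat
decreasing_by omega

-- while k > 0 and s[k-1] == s[i]: k -= 1   (c is the fixed value s[i])
def run_back (s : List Char) (c : Option Char) (k : Int) : Int :=
  if h : 0 < k ∧ PySem.List.pyGet? s (k - 1) = c then run_back s c (k - 1)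
  else k
termination_by k.toNat
decreasing_by omega

-- 'sub == sub[::-1]': s[a:b] via slice; [::-1] is List.reverse (PySem.List.slice?_none_none_neg_one)
def palindrome_index_2_alt (s : String) : Int :=
  let sl := s.toList
  let ij := alt_scan sl 0 ((sl.length : Int) - 1)
  let i := ij.1
  let j := ij.2
  if i ≥ j then -1
  else
    let sub := PySem.List.slice sl (some (i + 1)) (some (j + 1))
    if sub = sub.reverse then run_back sl (PySem.List.pyGet? sl i) i
    else
      let sub2 := PySem.List.slice sl (some i) (some j)
      if sub2 = sub2.reverse then j
      else -1

-- ===== PRECONDITION & SPEC =====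
def Spec_palindrome_index_2 (s : String) (out : Int) : Prop := out = palindrome_index_2_alt s
instance (s : String) (out : Int) : Decidable (Spec_palindrome_index_2 s out) := by unfold Spec_palindrome_index_2; infer_instance

-- ===== CLAIM (what is proved, stated in full; the proofs are below) =====
def Claim_equal_palindrome_index_2 : Prop := ∀ (s : String), Dom_palindrome_index_2 s → Spec_palindrome_index_2 s (palindrome_index_2 s)

-- ===== LEMMAS AND PROOFS =====

/-- deletion of index `k`: Python's `s[:k] + s[k+1:]`. -/
def rem (l : List Char) (k : Nat) : List Char := l.take k ++ l.drop (k + 1)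

lemma rem_length (l : List Char) (k : Nat) (hk : k < l.length) :
    (rem l k).length = l.length - 1 := by
  simp [rem]; omega

lemma rem_getElem? (l : List Char) (k m : Nat) (hk : k ≤ l.length) :
    (rem l k)[m]? = if m < k then l[m]? else l[m + 1]? := by
  rcases Nat.lt_or_ge m k with h | h
  · rw [rem, List.getElem?_append_left (by simp; omega), List.getElem?_take]
    simp [h]
  · rw [rem, List.getElem?_append_right (by simp; omega), List.getElem?_drop]
    rw [if_neg (by omega)]
    congr 1
    simp
    omega

/-- palindrome ↔ pointwise mirror condition, in `getElem?` form. -/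
lemma pal_iff (l : List Char) :
    l.reverse = l ↔ ∀ m, m < l.length → l[m]? = l[l.length - 1 - m]? := by
  constructor
  · intro h m hm
    conv_lhs => rw [← h]
    rw [List.getElem?_reverse hm]
  · intro h
    apply List.ext_getElem?
    intro m
    by_cases hm : m < l.length
    · rw [List.getElem?_reverse hm, ← h m hm]
    · rw [List.getElem?_eq_none (by simpa using hm), List.getElem?_eq_none (by omega)]

lemma pal_rev (x : List Char) : (x.reverse.reverse = x.reverse) ↔ (x.reverse = x) := by
  rw [List.reverse_reverse]
  exact eq_comm

lemma is_pal_go_iff (l : List Char) (cnt : Nat) : ∀ (i j : Int),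
    (is_pal_go l i j cnt = true ↔
      ∀ m : Nat, m < cnt → PySem.List.pyGet? l (i + m) = PySem.List.pyGet? l (j - m)) := by
  induction cnt with
  | zero => intro i j; simp [is_pal_go]
  | succ n ih =>
    intro i j
    rw [is_pal_go]
    by_cases h : PySem.List.pyGet? l i = PySem.List.pyGet? l j
    · rw [if_neg (by simpa using h), ih]
      constructor
      · intro hrec m hm
        cases m with
        | zero => simpa using h
        | succ m' =>
          have hx := hrec m' (by omega)
          rw [show i + ((m' + 1 : Nat) : Int) = i + 1 + m' by push_cast; ring,
              show j - ((m' + 1 : Nat) : Int) = j - 1 - m' by push_cast; ring]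
          exact hx
      · intro hall m hm
        have hx := hall (m + 1) (by omega)
        rw [show i + ((m + 1 : Nat) : Int) = i + 1 + m by push_cast; ring,
            show j - ((m + 1 : Nat) : Int) = j - 1 - m by push_cast; ring] at hx
        exact hx
    · rw [if_pos h]
      simp only [Bool.false_eq_true, false_iff]
      intro hall
      exact h (by simpa using hall 0 (by omega))

lemma is_pal_iff (l : List Char) : is_pal l = true ↔ l.reverse = l := by
  rw [is_pal, is_pal_go_iff]
  constructor
  · intro h
    rw [pal_iff]
    intro m hm
    by_cases hhalf : m < l.length / 2
    · have := h m hhalf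
      rw [show (0 : Int) + m = (m : Int) by ring,
          show ((l.length : Int) - 1 - m) = ((l.length - 1 - m : Nat) : Int) by omega,
          PySem.List.pyGet?_natCast, PySem.List.pyGet?_natCast] at this
      exact this
    · by_cases h2 : l.length - 1 - m < l.length / 2
      · have := h _ h2
        rw [show (0 : Int) + (l.length - 1 - m : Nat) = ((l.length - 1 - m : Nat) : Int) by ring,
            show ((l.length : Int) - 1 - (l.length - 1 - m : Nat)) = ((m : Nat) : Int) by omega,
            PySem.List.pyGet?_natCast, PySem.List.pyGet?_natCast] at this
        exact this.symm
      · have : l.length - 1 - m = m := by omega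
        rw [this]
  · intro h m hm
    rw [pal_iff] at h
    have hmn : m < l.length := by omega
    have := h m hmn
    rw [show (0 : Int) + m = (m : Int) by ring,
        show ((l.length : Int) - 1 - m) = ((l.length - 1 - m : Nat) : Int) by omega,
        PySem.List.pyGet?_natCast, PySem.List.pyGet?_natCast]
    exact this

-- ---- core combinatorics around the first mismatching pair (i, j = n-1-i) ----

lemma rem_eq_of_const (l : List Char) (i k : Nat) (hk : k ≤ i) (hi : i < l.length)
    (hconst : ∀ m, k ≤ m → m ≤ i → l[m]? = l[i]?) : rem l k = rem l i := by
  apply List.ext_getElem?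
  intro m
  by_cases hm : m < l.length - 1
  · rw [rem_getElem? l k m (by omega), rem_getElem? l i m (by omega)]
    split_ifs with h1 h2
    · rfl
    · omega
    · rw [hconst (m + 1) (by omega) (by omega), hconst m (by omega) (by omega)]
    · rfl
  · rw [List.getElem?_eq_none, List.getElem?_eq_none] <;> rw [rem_length] <;> omega

/-- adjacent equalities on `[k, i-1]` give a run constant equal to `l[i]`. -/
lemma const_of_adj (l : List Char) (i k : Nat) (hk : k ≤ i)
    (hadj : ∀ m, k ≤ m → m < i → l[m]? = l[m + 1]?) :
    ∀ m, k ≤ m → m ≤ i → l[m]? = l[i]? := by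
  intro m hm hmi
  induction hd : i - m generalizing m with
  | zero =>
    have : m = i := by omega
    rw [this]
  | succ d ih =>
    rw [hadj m hm (by omega)]
    exact ih (m + 1) (by omega) (by omega) (by omega)

lemma rem_reverse (l : List Char) (k : Nat) (hk : k < l.length) :
    (rem l k).reverse = rem l.reverse (l.length - 1 - k) := by
  rw [rem, rem, List.reverse_append, List.reverse_drop, List.reverse_take]
  congr 2 <;> omega

/-- K1: with ends matched below `i` and `j = n-1-i`, deleting `i` gives a palindrome iff
the inner window `l[i+1 : j+1]` is one. -/
lemma rem_mid_pal_iff (l : List Char) (i j : Nat) (hj : j = l.length - 1 - i) (hij : i < j)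
    (H1 : ∀ m, m < i → l[m]? = l[l.length - 1 - m]?) :
    ((rem l i).reverse = rem l i) ↔
      (((l.drop (i + 1)).take (j - i)).reverse = (l.drop (i + 1)).take (j - i)) := by
  have hn : j + i + 1 = l.length := by omega
  have hlenr : (rem l i).length = l.length - 1 := rem_length l i (by omega)
  have hlens : ((l.drop (i + 1)).take (j - i)).length = j - i := by simp; omega
  have hseg : ∀ m, m < j - i → ((l.drop (i + 1)).take (j - i))[m]? = l[i + 1 + m]? := by
    intro m hm
    rw [List.getElem?_take, if_pos hm, List.getElem?_drop]
  rw [pal_iff, pal_iff, hlenr, hlens]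
  constructor
  · intro h m hm
    have hx := h (i + m) (by omega)
    rw [rem_getElem? l i _ (by omega), if_neg (by omega),
        rem_getElem? l i _ (by omega), if_neg (by omega)] at hx
    rw [hseg m hm, hseg _ (by omega)]
    rw [show i + m + 1 = i + 1 + m by omega] at hx
    rw [show l.length - 1 - 1 - (i + m) + 1 = i + 1 + (j - i - 1 - m) by omega] at hx
    exact hx
  · intro h m hm
    rw [rem_getElem? l i _ (by omega), rem_getElem? l i _ (by omega)]
    rcases Nat.lt_or_ge m i with h1 | h1
    · rw [if_pos h1, if_neg (by omega)]
      have := H1 m h1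
      rw [show l.length - 1 - 1 - m + 1 = l.length - 1 - m by omega]
      exact this
    · rcases Nat.lt_or_ge m j with h2 | h2
      · rw [if_neg (by omega), if_neg (by omega)]
        have hx := h (m - i) (by omega)
        rw [hseg _ (by omega), hseg _ (by omega)] at hx
        rw [show m + 1 = i + 1 + (m - i) by omega,
            show l.length - 1 - 1 - m + 1 = i + 1 + (j - i - 1 - (m - i)) by omega]
        exact hx
      · rw [if_neg (by omega), if_pos (by omega)]
        have := H1 (l.length - 1 - 1 - m) (by omega)
        rw [show l.length - 1 - (l.length - 1 - 1 - m) = m + 1 by omega] at this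
        exact this.symm

/-- K4: deleting strictly between the mismatching pair never gives a palindrome. -/
lemma rem_between_not_pal (l : List Char) (i j k : Nat) (hj : j = l.length - 1 - i)
    (hik : i < k) (hkj : k < j) (H2 : l[i]? ≠ l[j]?) :
    ¬((rem l k).reverse = rem l k) := by
  intro hp
  rw [pal_iff] at hp
  have hx := hp i (by rw [rem_length l k (by omega)]; omega)
  rw [rem_length l k (by omega)] at hx
  rw [rem_getElem? l k i (by omega), if_pos hik,
      rem_getElem? l k _ (by omega), if_neg (by omega)] at hx
  rw [show l.length - 1 - 1 - i + 1 = j by omega] at hx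
  exact H2 hx

/-- K3: a palindromic deletion strictly left of the first mismatch forces a constant run
up to `i` and makes deleting `i` palindromic too. -/
lemma rem_left_pal (l : List Char) (i j k : Nat) (hj : j = l.length - 1 - i)
    (hk : k < i) (hij : i < j)
    (H1 : ∀ m, m < i → l[m]? = l[l.length - 1 - m]?)
    (hp : (rem l k).reverse = rem l k) :
    (∀ m, k ≤ m → m ≤ i → l[m]? = l[i]?) ∧ ((rem l i).reverse = rem l i) := by
  have hadj : ∀ m, k ≤ m → m < i → l[m]? = l[m + 1]? := by
    intro m hm hmi
    have hx := (pal_iff _).1 hp m (by rw [rem_length l k (by omega)]; omega)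
    rw [rem_length l k (by omega)] at hx
    rw [rem_getElem? l k m (by omega), if_neg (by omega),
        rem_getElem? l k _ (by omega), if_neg (by omega)] at hx
    rw [show l.length - 1 - 1 - m + 1 = l.length - 1 - m by omega] at hx
    rw [← H1 m (by omega)] at hx
    exact hx.symm
  have hconst := const_of_adj l i k (by omega) hadj
  have heq := rem_eq_of_const l i k (by omega) (by omega) hconst
  exact ⟨hconst, by rw [← heq]; exact hp⟩

/-- the matched-prefix hypothesis transfers to the reversed string (same `i`). -/
lemma matched_reverse (l : List Char) (i : Nat) (hi : 2 * i < l.length)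
    (H1 : ∀ m, m < i → l[m]? = l[l.length - 1 - m]?) :
    ∀ m, m < i → l.reverse[m]? = l.reverse[l.reverse.length - 1 - m]? := by
  intro m hmi
  rw [List.length_reverse, List.getElem?_reverse (by omega), List.getElem?_reverse (by omega),
      show l.length - 1 - (l.length - 1 - m) = m by omega]
  exact (H1 m hmi).symm

/-- K2: deleting `j` gives a palindrome iff the window `l[i : j]` is one. -/
lemma rem_right_pal_iff (l : List Char) (i j : Nat) (hj : j = l.length - 1 - i) (hij : i < j)
    (H1 : ∀ m, m < i → l[m]? = l[l.length - 1 - m]?) :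
    ((rem l j).reverse = rem l j) ↔
      (((l.drop i).take (j - i)).reverse = (l.drop i).take (j - i)) := by
  have hn : 2 ≤ l.length := by omega
  have K := rem_mid_pal_iff l.reverse i j (by simp; omega) hij
    (matched_reverse l i (by omega) H1)
  have h1 : rem l.reverse i = (rem l j).reverse := by
    rw [rem_reverse l j (by omega), show l.length - 1 - j = i by omega]
  have hA : (l.drop i).take (j - i) = (l.take j).drop i := by
    rw [List.take_drop, show i + (j - i) = j by omega]
  have h2 : (l.reverse.drop (i + 1)).take (j - i) = ((l.drop i).take (j - i)).reverse := by
    rw [hA, show i + 1 = l.length - j by omega, ← List.reverse_take,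
        List.reverse_drop, List.length_take, Nat.min_eq_left (by omega)]
  rw [h1, h2] at K
  rw [pal_rev, pal_rev] at K
  exact K

/-- K5: a palindromic deletion strictly right of `j` makes deleting `j` palindromic too. -/
lemma rem_far_pal (l : List Char) (i j k : Nat) (hj : j = l.length - 1 - i) (hij : i < j)
    (hjk : j < k) (hkn : k < l.length)
    (H1 : ∀ m, m < i → l[m]? = l[l.length - 1 - m]?)
    (hp : (rem l k).reverse = rem l k) :
    (rem l j).reverse = rem l j := by
  have hk' : l.length - 1 - k < i := by omega
  have hpr : (rem l.reverse (l.length - 1 - k)).reverse = rem l.reverse (l.length - 1 - k) := by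
    rw [← rem_reverse l k hkn, pal_rev]
    exact hp
  have hres := (rem_left_pal l.reverse i j (l.length - 1 - k) (by simp; omega) hk' hij
    (matched_reverse l i (by omega) H1) hpr).2
  have h1 : rem l.reverse i = (rem l j).reverse := by
    rw [rem_reverse l j (by omega), show l.length - 1 - j = i by omega]
  rw [h1, pal_rev] at hres
  exact hres

-- ---- bridges: each port equals its mathematical characterization ----

lemma find_pal_go_enum (xs : List (List Char)) (s : Int) :
    find_pal_go (PySem.List.enumerate xs s)
      = match xs.findIdx? is_pal with
        | some k => s + k
        | none => -1 := by
  induction xs generalizing s with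
  | nil => simp [PySem.List.enumerate_nil, find_pal_go, List.findIdx?_nil]
  | cons x xs ih =>
    rw [PySem.List.enumerate_cons, find_pal_go, List.findIdx?_cons]
    by_cases h : is_pal x
    · simp [h]
    · rw [if_neg h, if_neg (by simp [h]), ih]
      cases hf : xs.findIdx? is_pal <;> simp <;> push_cast <;> ring

lemma A_char (s : String) :
    palindrome_index_2 s =
      if is_pal s.toList then -1
      else
        match (List.range s.toList.length).findIdx? (fun k => is_pal (rem s.toList k)) with
        | some k => (k : Int)
        | none => -1 := by
  by_cases hp : is_pal s.toList
  · simp [palindrome_index_2, hp]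
  · rw [palindrome_index_2]
    simp only [hp, if_false, Bool.false_eq_true]
    rw [PySem.List.foldl_append_singleton_eq_map, List.nil_append,
        PySem.List.pyRange_zero_natCast, List.map_map, find_pal_go_enum]
    have hmap : (List.range s.toList.length).map
        ((fun i => PySem.List.slice s.toList (some 0) (some i) ++ PySem.List.slice s.toList (some (i + 1)) none) ∘ (fun k : Nat => (k : Int)))
        = (List.range s.toList.length).map (rem s.toList) := by
      apply List.map_congr_left
      intro k hk
      simp only [Function.comp_apply]
      rw [PySem.List.slice_zero_start, PySem.List.slice_to_natCast,
          show ((k : Int) + 1) = ((k + 1 : Nat) : Int) by push_cast; ring,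
          PySem.List.slice_from_natCast]
      rfl
    rw [hmap, List.findIdx?_map]
    simp only [String.length_toList]
    cases hf : (List.range s.length).findIdx? (is_pal ∘ rem s.toList) <;>
      · simp only [Function.comp_def] at hf
        simp [hf]

lemma alt_scan_spec (l : List Char) : ∀ (fuel : Nat) (i : Nat), l.length - i ≤ fuel →
    (∀ m, m < i → l[m]? = l[l.length - 1 - m]?) →
    ∃ i' : Nat,
      alt_scan l (i : Int) ((l.length : Int) - 1 - i) = ((i' : Int), (l.length : Int) - 1 - i') ∧
      i ≤ i' ∧
      (∀ m, m < i' → l[m]? = l[l.length - 1 - m]?) ∧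
      ¬(((i' : Int)) < (l.length : Int) - 1 - i' ∧
        PySem.List.pyGet? l i' = PySem.List.pyGet? l ((l.length : Int) - 1 - i')) := by
  intro fuel
  induction fuel with
  | zero =>
    intro i hfu hm
    refine ⟨i, ?_, le_refl i, hm, ?_⟩
    · rw [alt_scan, dif_neg (by omega)]
    · omega
  | succ f ih =>
    intro i hfu hm
    rw [alt_scan]
    by_cases hc : (i : Int) < (l.length : Int) - 1 - i ∧
        PySem.List.pyGet? l i = PySem.List.pyGet? l ((l.length : Int) - 1 - i)
    · rw [dif_pos hc]
      obtain ⟨hlt, heq⟩ := hc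
      have hmatch : ∀ m, m < i + 1 → l[m]? = l[l.length - 1 - m]? := by
        intro m hmi
        rcases Nat.lt_or_ge m i with h1 | h1
        · exact hm m h1
        · have hmeq : m = i := by omega
          subst hmeq
          rw [PySem.List.pyGet?_natCast,
              show (l.length : Int) - 1 - m = ((l.length - 1 - m : Nat) : Int) by omega,
              PySem.List.pyGet?_natCast] at heq
          exact heq
      have := ih (i + 1) (by omega) hmatch
      rw [show ((i : Int) + 1) = ((i + 1 : Nat) : Int) by push_cast; ring,
          show ((l.length : Int) - 1 - i - 1) = ((l.length : Int) - 1 - ((i + 1 : Nat) : Int)) by push_cast; ring]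
      obtain ⟨i', hrun, hle, hmm, hstop⟩ := this
      exact ⟨i', hrun, by omega, hmm, hstop⟩
    · rw [dif_neg hc]
      exact ⟨i, rfl, le_refl i, hm, hc⟩

lemma run_back_spec (l : List Char) (c : Option Char) : ∀ (k : Nat),
    ∃ r : Nat, run_back l c (k : Int) = (r : Int) ∧ r ≤ k ∧
      (∀ m, r ≤ m → m < k → PySem.List.pyGet? l (m : Int) = c) ∧
      (r = 0 ∨ PySem.List.pyGet? l ((r : Int) - 1) ≠ c) := by
  intro k
  induction k with
  | zero => exact ⟨0, by rw [run_back, dif_neg (by omega)], le_refl 0, by omega, Or.inl rfl⟩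
  | succ k ih =>
    rw [run_back]
    by_cases hc : (0 : Int) < ((k + 1 : Nat) : Int) ∧
        PySem.List.pyGet? l (((k + 1 : Nat) : Int) - 1) = c
    · rw [dif_pos hc]
      obtain ⟨r, hrun, hle, hall, hstop⟩ := ih
      rw [show (((k + 1 : Nat) : Int) - 1) = ((k : Nat) : Int) by push_cast; ring]
      refine ⟨r, hrun, by omega, ?_, hstop⟩
      intro m hrm hmk
      rcases Nat.lt_or_ge m k with h1 | h1
      · exact hall m hrm h1
      · have hmeq : m = k := by omega
        have h2 := hc.2
        rw [show (((k + 1 : Nat) : Int) - 1) = ((k : Nat) : Int) by push_cast; ring] at h2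
        rw [hmeq]
        exact h2
    · rw [dif_neg hc]
      refine ⟨k + 1, rfl, le_refl _, by omega, Or.inr ?_⟩
      intro hne
      exact hc ⟨by omega, hne⟩

-- ===== VERDICT (by name: the statement is the Claim_ definition above) =====
theorem palindrome_index_2_spec : Claim_equal_palindrome_index_2 := by
  intro s _hdom
  unfold Spec_palindrome_index_2
  obtain ⟨i₀, hrun, -, hm, hstop⟩ :=
    alt_scan_spec s.toList s.toList.length 0 (by omega) (by omega)
  simp only [Nat.cast_zero, sub_zero] at hrun
  rw [palindrome_index_2_alt]
  simp only []
  rw [hrun]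
  dsimp only
  by_cases hcase : ((i₀ : Int) < (s.toList.length : Int) - 1 - i₀)
  · -- a real mismatch was found at (i₀, jN)
    have hjN : ∃ jN : Nat, jN = s.toList.length - 1 - i₀ := ⟨_, rfl⟩
    obtain ⟨jN, hjdef⟩ := hjN
    have hjc : ((s.toList.length : Int) - 1 - i₀) = (jN : Int) := by omega
    have hij : i₀ < jN := by omega
    have hjn : jN = s.toList.length - 1 - i₀ := hjdef
    have hn2 : 2 ≤ s.toList.length := by omega
    have H2 : s.toList[i₀]? ≠ s.toList[jN]? := by
      intro he
      apply hstop
      refine ⟨hcase, ?_⟩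
      rw [PySem.List.pyGet?_natCast, hjc, PySem.List.pyGet?_natCast]
      exact he
    have hnp : ¬(s.toList.reverse = s.toList) := by
      intro hpal
      rw [pal_iff] at hpal
      have := hpal i₀ (by omega)
      rw [← hjn] at this
      exact H2 this
    rw [A_char, if_neg (by rw [is_pal_iff]; exact hnp), if_neg (by omega)]
    have hsub : PySem.List.slice s.toList (some ((i₀ : Int) + 1))
        (some ((s.toList.length : Int) - 1 - i₀ + 1))
        = (s.toList.drop (i₀ + 1)).take (jN - i₀) := by
      rw [hjc, show ((i₀ : Int) + 1) = ((i₀ + 1 : Nat) : Int) by push_cast; ring,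
          show ((jN : Int) + 1) = ((jN + 1 : Nat) : Int) by push_cast; ring,
          PySem.List.slice_natCast, show jN + 1 - (i₀ + 1) = jN - i₀ by omega]
    have hsub2 : PySem.List.slice s.toList (some (i₀ : Int))
        (some ((s.toList.length : Int) - 1 - i₀))
        = (s.toList.drop i₀).take (jN - i₀) := by
      rw [hjc, PySem.List.slice_natCast]
    have K1 := rem_mid_pal_iff s.toList i₀ jN hjn hij hm
    have K2 := rem_right_pal_iff s.toList i₀ jN hjn hij hm
    rw [hsub, hsub2]
    by_cases hL : (s.toList.drop (i₀ + 1)).take (jN - i₀)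
        = ((s.toList.drop (i₀ + 1)).take (jN - i₀)).reverse
    · -- deleting the left end of the mismatch works: answer = start of the constant run
      rw [if_pos hL]
      obtain ⟨r, hrb, hrle, hall, hstop2⟩ :=
        run_back_spec s.toList (PySem.List.pyGet? s.toList (i₀ : Int)) i₀
      have hpi : (rem s.toList i₀).reverse = rem s.toList i₀ := K1.mpr hL.symm
      have hconst : ∀ m, r ≤ m → m ≤ i₀ → s.toList[m]? = s.toList[i₀]? := by
        intro m hrm hmi
        rcases Nat.lt_or_ge m i₀ with h1 | h1
        · have := hall m hrm h1
          rw [PySem.List.pyGet?_natCast, PySem.List.pyGet?_natCast] at this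
          exact this
        · rw [show m = i₀ by omega]
      have hremeq : rem s.toList r = rem s.toList i₀ :=
        rem_eq_of_const s.toList i₀ r hrle (by omega) hconst
      have hfind : (List.range s.toList.length).findIdx?
          (fun k => is_pal (rem s.toList k)) = some r := by
        rw [List.findIdx?_eq_some_iff_getElem]
        refine ⟨by simpa using (by omega : r < s.toList.length), ?_, ?_⟩
        · simp only [List.getElem_range]
          rw [is_pal_iff, hremeq]
          exact hpi
        · intro m hmr
          simp only [List.getElem_range]
          intro hpal'
          rw [is_pal_iff] at hpal'
          have hml := (rem_left_pal s.toList i₀ jN m hjn (by omega) hij hm hpal').1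
          have hr1 : 1 ≤ r := by omega
          rcases hstop2 with h0 | hne
          · omega
          · apply hne
            rw [show ((r : Int) - 1) = ((r - 1 : Nat) : Int) by omega,
                PySem.List.pyGet?_natCast, PySem.List.pyGet?_natCast]
            exact hml (r - 1) (by omega) (by omega)
      rw [hfind]
      exact hrb.symm
    · rw [if_neg hL]
      by_cases hR : (s.toList.drop i₀).take (jN - i₀)
          = ((s.toList.drop i₀).take (jN - i₀)).reverse
      · -- deleting the right end of the mismatch works: answer = jN
        rw [if_pos hR]
        have hpj : (rem s.toList jN).reverse = rem s.toList jN := K2.mpr hR.symm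
        have hfind : (List.range s.toList.length).findIdx?
            (fun k => is_pal (rem s.toList k)) = some jN := by
          rw [List.findIdx?_eq_some_iff_getElem]
          refine ⟨by simpa using (by omega : jN < s.toList.length), ?_, ?_⟩
          · simp only [List.getElem_range]
            rw [is_pal_iff]
            exact hpj
          · intro m hmj
            simp only [List.getElem_range]
            intro hpal'
            rw [is_pal_iff] at hpal'
            rcases Nat.lt_or_ge m i₀ with h1 | h1
            · exact hL ((K1.mp (rem_left_pal s.toList i₀ jN m hjn h1 hij hm hpal').2).symm)
            · rcases Nat.eq_or_lt_of_le h1 with h2 | h2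
              · rw [← h2] at hpal'
                exact hL ((K1.mp hpal').symm)
              · exact rem_between_not_pal s.toList i₀ jN m hjn h2 (by omega) H2 hpal'
        rw [hfind, hjc]
      · -- no single deletion works: both return -1
        rw [if_neg hR]
        have hfind : (List.range s.toList.length).findIdx?
            (fun k => is_pal (rem s.toList k)) = none := by
          rw [List.findIdx?_eq_none_iff]
          intro k hk
          rw [List.mem_range] at hk
          rw [← Bool.not_eq_true, is_pal_iff]
          intro hpal'
          rcases Nat.lt_or_ge k i₀ with h1 | h1
          · exact hL ((K1.mp (rem_left_pal s.toList i₀ jN k hjn h1 hij hm hpal').2).symm)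
          · rcases Nat.eq_or_lt_of_le h1 with h2 | h2
            · rw [← h2] at hpal'
              exact hL ((K1.mp hpal').symm)
            · rcases Nat.lt_or_ge k jN with h3 | h3
              · exact rem_between_not_pal s.toList i₀ jN k hjn h2 h3 H2 hpal'
              · rcases Nat.eq_or_lt_of_le h3 with h4 | h4
                · rw [← h4] at hpal'
                  exact hR ((K2.mp hpal').symm)
                · exact hR ((K2.mp (rem_far_pal s.toList i₀ jN k hjn hij h4 hk hm hpal')).symm)
        rw [hfind]
  · -- the two pointers met: the string is a palindrome, both return -1
    have hpal : s.toList.reverse = s.toList := by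
      rw [pal_iff]
      intro m hmn
      rcases Nat.lt_or_ge m i₀ with h1 | h1
      · exact hm m h1
      · rcases Nat.lt_or_ge (s.toList.length - 1 - m) i₀ with h2 | h2
        · have := hm (s.toList.length - 1 - m) h2
          rw [show s.toList.length - 1 - (s.toList.length - 1 - m) = m by omega] at this
          exact this.symm
        · rw [show s.toList.length - 1 - m = m by omega]
    rw [if_pos (by omega), A_char, if_pos (by rw [is_pal_iff]; exact hpal)]
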